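-- pv_equiv track=rewrite | github.com/fishsauce-05/PythonInPTIT | PY01027.py | solve
-- ===== SOURCE A (Python) =====
-- def solve(strN):
-- 	for i in range(len(strN)):
-- 		if strN[i] != '6' and strN[i] != '8':
-- 			return 'NO'
-- 		if strN[i] == '8':
-- 			try:
-- 				if strN[i:i+3] == '888':
-- 					return 'NO'
-- 			except:
-- 				continue
-- 	return 'YES'
-- ===== SOURCE B (Python) =====
-- def _step(state, c):
--     # DFA: state = number of trailing consecutive '8's (0..2), -1 = rejected (absorbing)
--     if state < 0:
--         return -1
--     if c == '6':
--         return 0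
--     if c == '8':
--         return state + 1 if state < 2 else -1
--     return -1
--
-- def solve(strN):
--     state = 0
--     for c in strN:
--         state = _step(state, c)
--     return 'YES' if state >= 0 else 'NO'
-- ===== Notes on version B (the rewrite author's own statement) =====
-- stated objective: alternative
-- what changed: Replaces A's indexed loop with early returns and a three-character lookahead slice by a single run-to-completion DFA fold whose state counts trailing consecutive '8's (with an absorbing reject state), with no slicing, no indexing and no early exit.
import Mathlib
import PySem

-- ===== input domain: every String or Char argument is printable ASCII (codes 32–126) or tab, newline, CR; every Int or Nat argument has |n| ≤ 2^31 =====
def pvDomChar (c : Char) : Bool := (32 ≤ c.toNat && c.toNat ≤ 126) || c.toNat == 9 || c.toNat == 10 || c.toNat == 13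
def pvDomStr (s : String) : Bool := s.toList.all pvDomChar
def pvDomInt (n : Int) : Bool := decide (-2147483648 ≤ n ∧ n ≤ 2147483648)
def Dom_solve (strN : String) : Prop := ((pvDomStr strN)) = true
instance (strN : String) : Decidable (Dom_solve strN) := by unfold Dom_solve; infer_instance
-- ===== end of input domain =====

-- B replaces A's indexed early-return loop with a three-character lookahead slice by a
-- single-pass DFA fold counting trailing consecutive '8's (objective: alternative).

-- ===== PORT A =====
-- the for-i-in-range loop with early returns; the try/except around the slice is vestigial
-- (Python slicing never raises), so no exception can occur there
def solveLoop (cs : List Char) (i : Nat) : String :=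
  if h : i < cs.length then
    if cs[i] ≠ '6' ∧ cs[i] ≠ '8' then "NO"
    else if cs[i] = '8' then
      if PySem.List.slice cs (some (i : Int)) (some ((i : Int) + 3)) = ['8', '8', '8'] then "NO"
      else solveLoop cs (i + 1)
    else solveLoop cs (i + 1)
  else "YES"
termination_by cs.length - i

def solve (strN : String) : String := solveLoop strN.toList 0

-- ===== PORT B =====
-- DFA transition: state = number of trailing consecutive '8's (0..2), -1 = rejected (absorbing)
def solveStep (state : Int) (c : Char) : Int :=
  if state < 0 then -1
  else if c = '6' then 0
  else if c = '8' then (if state < 2 then state + 1 else -1)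
  else -1

def solve_alt (strN : String) : String :=
  if 0 ≤ strN.toList.foldl solveStep 0 then "YES" else "NO"

-- ===== PRECONDITION & SPEC =====
def Spec_solve (strN : String) (out : String) : Prop := out = solve_alt strN
instance (strN : String) (out : String) : Decidable (Spec_solve strN out) := by unfold Spec_solve; infer_instance

-- ===== CLAIM (what is proved, stated in full; the proofs are below) =====
def Claim_equal_solve : Prop := ∀ (strN : String), Dom_solve strN → Spec_solve strN (solve strN)

-- ===== LEMMAS AND PROOFS =====

theorem prefix888_iff_take (l : List Char) :
    (['8', '8', '8'] <+: l) ↔ l.take 3 = ['8', '8', '8'] := by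
  constructor
  · rintro ⟨t, rfl⟩; rfl
  · intro h; exact h ▸ List.take_prefix 3 l

theorem solveLoop_eq (cs : List Char) (i : Nat) :
    solveLoop cs i =
      if ((cs.drop i).all (fun c => c == '6' || c == '8')
          && !decide (['8', '8', '8'] <:+: cs.drop i)) then "YES" else "NO" := by
  by_cases h : i < cs.length
  · rw [solveLoop]
    have hdrop : cs.drop i = cs[i] :: cs.drop (i + 1) := List.drop_eq_getElem_cons h
    have hslice : PySem.List.slice cs (some (i : Int)) (some ((i : Int) + 3))
        = (cs.drop i).take 3 := by
      have := PySem.List.slice_natCast_add (xs := cs) (j := i) (n := 3)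
      simpa using this
    rw [hslice]
    have ih := solveLoop_eq cs (i + 1)
    simp only [h, dite_true]
    by_cases h6 : cs[i] = '6'
    · simp only [h6]
      rw [if_neg (by simp), if_neg (by decide), ih, hdrop]
      have hpre : ¬ (['8', '8', '8'] <+: ('6' : Char) :: cs.drop (i + 1)) := by
        rintro ⟨t, ht⟩; simp at ht
      simp [List.infix_cons_iff, hpre, h6]
    · by_cases h8 : cs[i] = '8'
      · simp only [h8]
        rw [if_neg (by simp)]
        rw [if_pos trivial]
        by_cases h3 : (cs.drop i).take 3 = ['8', '8', '8']
        · rw [if_pos h3]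
          have : (['8', '8', '8'] : List Char) <:+: cs.drop i :=
            ((prefix888_iff_take _).2 h3).isInfix
          simp [this]
        · rw [if_neg h3, ih, hdrop]
          have hpre : ¬ (['8', '8', '8'] <+: cs.drop i) := fun hp =>
            h3 ((prefix888_iff_take _).1 hp)
          rw [hdrop] at hpre
          simp only [h8] at hpre
          have hpre' : ¬ (['8', '8'] <+: List.drop (i + 1) cs) := by
            intro hp
            exact hpre (List.cons_prefix_cons.2 ⟨rfl, hp⟩)
          simp [List.infix_cons_iff, h8, hpre']
      · rw [if_pos ⟨h6, h8⟩, hdrop]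
        simp
        intro hall
        exact absurd (hall cs[i] (hdrop ▸ List.mem_cons_self)) (by tauto)
  · rw [solveLoop]
    simp [h, List.drop_eq_nil_of_le (Nat.le_of_not_lt h)]
termination_by cs.length - i

theorem foldl_step_neg (cs : List Char) : cs.foldl solveStep (-1) = -1 := by
  induction cs with
  | nil => rfl
  | cons c t ih => simpa [solveStep] using ih

theorem foldl_step_eq (cs : List Char) : ∀ s : Int, 0 ≤ s → s ≤ 2 →
    (0 ≤ cs.foldl solveStep s ↔
      (cs.all (fun c => c == '6' || c == '8')
        ∧ ¬ (List.replicate (3 - s.toNat) '8' <+: cs)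
        ∧ ¬ (['8', '8', '8'] <:+: cs))) := by
  induction cs with
  | nil =>
    intro s h0 h2
    have hrep : List.replicate (3 - s.toNat) '8' ≠ ([] : List Char) := by
      have : s.toNat ≤ 2 := by omega
      simp; omega
    simp [List.foldl, h0, List.prefix_nil, hrep]
  | cons c t ih =>
    intro s h0 h2
    have hns : ¬ s < 0 := by omega
    have hrep3 : 3 - s.toNat = (2 - s.toNat) + 1 := by omega
    by_cases h6 : c = '6'
    · subst h6
      rw [List.foldl_cons]
      have hstep : solveStep s '6' = 0 := by simp [solveStep, hns]
      rw [hstep, ih 0 (by omega) (by omega)]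
      have hpre : ¬ (List.replicate (3 - s.toNat) '8' <+: ('6' : Char) :: t) := by
        rw [hrep3, List.replicate_succ]
        rintro ⟨u, hu⟩; simp at hu
      have hpre3 : ¬ (['8', '8', '8'] <+: ('6' : Char) :: t) := by
        rintro ⟨u, hu⟩; simp at hu
      simp [List.infix_cons_iff, hpre, hpre3]
      exact fun _ hinf hp => hinf hp.isInfix
    · by_cases h8 : c = '8'
      · subst h8
        rw [List.foldl_cons]
        by_cases hs2 : s < 2
        · have hstep : solveStep s '8' = s + 1 := by simp [solveStep, hns, hs2]
          rw [hstep, ih (s + 1) (by omega) (by omega)]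
          have hto : (s + 1).toNat = s.toNat + 1 := by omega
          have hrep' : (3 - (s + 1).toNat) = 2 - s.toNat := by omega
          have hpre_cons : (List.replicate (3 - s.toNat) '8' <+: ('8' : Char) :: t)
              ↔ (List.replicate (2 - s.toNat) '8' <+: t) := by
            rw [hrep3, List.replicate_succ, List.cons_prefix_cons]
            simp
          have hpre888 : (['8', '8', '8'] <+: ('8' : Char) :: t)
              ↔ (['8', '8'] <+: t) := by
            rw [show (['8','8','8'] : List Char) = '8' :: ['8','8'] from rfl,
              List.cons_prefix_cons]; simp
          have h88_imp : (['8', '8'] <+: t) → (List.replicate (2 - s.toNat) '8' <+: t) := by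
            intro hp
            have : List.replicate (2 - s.toNat) '8' <+: (['8', '8'] : List Char) := by
              have h22 : 2 - s.toNat ≤ 2 := by omega
              interval_cases h : (2 - s.toNat) <;> simp
            exact this.trans hp
          rw [hrep']
          constructor
          · rintro ⟨hall, hp, hinf⟩
            refine ⟨by simp [hall], by rwa [hpre_cons], ?_⟩
            rw [List.infix_cons_iff, hpre888]
            push_neg
            exact ⟨fun h88 => hp (h88_imp h88), hinf⟩
          · rintro ⟨hall, hp, hinf⟩
            rw [List.infix_cons_iff, hpre888] at hinf
            push_neg at hinf
            exact ⟨by simpa using hall, by rwa [hpre_cons] at hp, hinf.2⟩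
        · have hs : s = 2 := by omega
          subst hs
          have hstep : solveStep 2 '8' = -1 := by simp [solveStep]
          rw [hstep, foldl_step_neg]
          have hpre : List.replicate (3 - (2 : Int).toNat) '8' <+: ('8' : Char) :: t := by
            simp
          simp
      · rw [List.foldl_cons]
        have hstep : solveStep s c = -1 := by simp [solveStep, hns, h6, h8]
        rw [hstep, foldl_step_neg]
        simp [h6, h8]

-- ===== VERDICT (by name: the statement is the Claim_ definition above) =====
theorem solve_spec : Claim_equal_solve := by
  intro strN _
  unfold Spec_solve solve solve_alt
  rw [solveLoop_eq]
  have h := foldl_step_eq strN.toList 0 (by omega) (by omega)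
  by_cases hB : 0 ≤ strN.toList.foldl solveStep 0
  · rw [if_pos hB]
    obtain ⟨hall, hp, hinf⟩ := h.1 hB
    simp [hall, hinf]
  · rw [if_neg hB]
    have hA : ¬ ((strN.toList.all (fun c => c == '6' || c == '8')) = true
        ∧ ¬ (['8', '8', '8'] <:+: strN.toList)) := by
      rintro ⟨hall, hinf⟩
      refine hB (h.2 ⟨hall, ?_, hinf⟩)
      intro hp
      exact hinf (by simpa using List.IsPrefix.isInfix hp)
    rw [if_neg]
    simpa using hA
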